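-- pv_equiv track=rewrite | github.com/KangminLim/CodingTest | 프로그래머스/2/17683. ［3차］ 방금그곡/［3차］ 방금그곡.py | solution
-- ===== SOURCE A (Python) =====
-- def change(s):
--     s = s.replace('C#','c')
--     s = s.replace('D#','d')
--     s = s.replace('F#','f')
--     s = s.replace('G#','g')
--     s = s.replace('A#','a')
--     s = s.replace('B#','b')
--     return s
--
-- def solution(m, musicinfos):
--     answer = []
--     m = change(m)
--     for musicinfo in musicinfos:
--         musicinfo = musicinfo.split(',')
--         st,et,name,info = musicinfo
--         st = int(st[:2])*60 + int(st[3:])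
--         et = int(et[:2])*60 + int(et[3:])
--
--         info = change(info)
--         div,mod = divmod(et-st,len(info))
--         tmp = info*div + info[:mod]
--
--         # for i in range(len(tmp)):
--         #     if tmp[i:i+len(m)] == m and tmp[i+len(m)] != '#':
--         if m in tmp:
--             answer.append((et-st,name))
--     if answer:
--         return sorted(answer,key = lambda x:(-x[0]))[0][1]
--     else:
--         return "(None)"
-- ===== SOURCE B (Python) =====
-- def change(s):
--     notes = {'C': 'c', 'D': 'd', 'F': 'f', 'G': 'g', 'A': 'a', 'B': 'b'}
--     out = []
--     i = 0
--     while i < len(s):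
--         if i + 1 < len(s) and s[i + 1] == '#' and s[i] in notes:
--             out.append(notes[s[i]])
--             i += 2
--         else:
--             out.append(s[i])
--             i += 1
--     return ''.join(out)
--
-- def to_sec(ts):
--     return int(ts[:2]) * 60 + int(ts[3:])
--
-- def solution(m, musicinfos):
--     melody = change(m)
--     k = len(melody)
--     best = None
--     for row in musicinfos:
--         st, et, name, info = row.split(',')
--         t = to_sec(et) - to_sec(st)
--         notes = change(info)
--         L = len(notes)
--         # circular match: the played string is the length-t prefix of notes repeated
--         # forever, so it contains melody iff some window starting at j < L fits in t
--         ext = notes * (1 + (k + L - 1) // L)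
--         if any(ext[j:j + k] == melody for j in range(min(L, t - k + 1))):
--             if best is None or t > best[0]:
--                 best = (t, name)
--     return best[1] if best is not None else "(None)"
-- ===== Notes on version B (the rewrite author's own statement) =====
-- stated objective: alternative
-- what changed: B never builds the played-out string: it matches the melody against the periodic note sequence circularly, testing only the |notes| windows that start inside one period (on an extension of length |notes|+|melody|), normalises sharps in one left-to-right scan instead of six replace passes, and keeps a running best instead of collecting all matches and sorting.
-- outside the precondition, e.g. on solution('', ['00:05,00:03,x,AB']): A returns 'x', B returns '(None)'; on solution('A', ['00:10,00:08,x,ABC']): A returns 'x', B returns '(None)'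
import Mathlib
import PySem

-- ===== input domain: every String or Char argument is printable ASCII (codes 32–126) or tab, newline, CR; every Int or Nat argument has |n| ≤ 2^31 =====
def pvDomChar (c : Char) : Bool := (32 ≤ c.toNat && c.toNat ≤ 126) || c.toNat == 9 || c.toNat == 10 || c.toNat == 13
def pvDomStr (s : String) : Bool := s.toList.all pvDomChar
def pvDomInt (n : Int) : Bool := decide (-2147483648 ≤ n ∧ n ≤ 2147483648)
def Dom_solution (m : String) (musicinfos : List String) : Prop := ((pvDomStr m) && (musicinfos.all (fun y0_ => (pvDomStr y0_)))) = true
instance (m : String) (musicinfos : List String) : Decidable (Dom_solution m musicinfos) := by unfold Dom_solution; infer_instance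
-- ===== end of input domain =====

-- B never materialises the played-out melody string: it matches the melody against the
-- periodic note sequence circularly (windows starting inside one period), normalises sharps
-- by one left-to-right scan instead of six replace passes, and keeps a running best instead
-- of collect-and-sort; objective: alternative.

-- ===== PORT A =====
def change (s : String) : String :=
  PySem.Str.replace (PySem.Str.replace (PySem.Str.replace (PySem.Str.replace (PySem.Str.replace (PySem.Str.replace s "C#" "c") "D#" "d") "F#" "f") "G#" "g") "A#" "a") "B#" "b"

def solution (m : String) (musicinfos : List String) : String :=
  let m' := change m
  let answer : List (Int × String) := musicinfos.foldl (fun answer musicinfo =>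
    let parts := (PySem.Str.split? musicinfo ",").getD []
    let st := parts.getD 0 ""
    let et := parts.getD 1 ""
    let name := parts.getD 2 ""
    let info := parts.getD 3 ""
    let stS := (PySem.Int.ofStr? (PySem.Str.slice st none (some 2))).getD 0 * 60 +
               (PySem.Int.ofStr? (PySem.Str.slice st (some 3) none)).getD 0
    let etS := (PySem.Int.ofStr? (PySem.Str.slice et none (some 2))).getD 0 * 60 +
               (PySem.Int.ofStr? (PySem.Str.slice et (some 3) none)).getD 0
    let info' := change info
    let dm := (PySem.Int.divmod? (etS - stS) (PySem.Str.len info')).getD (0, 0)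
    let tmp := String.ofList (PySem.List.pyRepeat info'.toList dm.1 ++
               PySem.Chars.slice info'.toList none (some dm.2))
    if PySem.Str.isIn m' tmp then answer ++ [(etS - stS, name)] else answer) []
  if answer.isEmpty then "(None)"
  else ((PySem.List.sorted answer (fun x => -x.1) false).headD (0, "")).2

-- ===== PORT B =====
def isNote (c : Char) : Bool := c == 'C' || c == 'D' || c == 'F' || c == 'G' || c == 'A' || c == 'B'

def lowNote (c : Char) : Char :=
  if c == 'C' then 'c' else if c == 'D' then 'd' else if c == 'F' then 'f'
  else if c == 'G' then 'g' else if c == 'A' then 'a' else 'b'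

-- the while loop of B's change: one left-to-right scan over the characters
def scanChange : List Char → List Char
  | [] => []
  | [c] => [c]
  | c :: d :: rest =>
      if d = '#' ∧ isNote c then lowNote c :: scanChange rest
      else c :: scanChange (d :: rest)
termination_by l => l.length

def change_alt (s : String) : String := String.ofList (scanChange s.toList)

def toSec (ts : String) : Int :=
  (PySem.Int.ofStr? (PySem.Str.slice ts none (some 2))).getD 0 * 60 +
  (PySem.Int.ofStr? (PySem.Str.slice ts (some 3) none)).getD 0

def solution_alt (m : String) (musicinfos : List String) : String :=
  let melody := change_alt m
  let k := PySem.Str.len melody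
  let best : Option (Int × String) := musicinfos.foldl (fun best row =>
    let parts := (PySem.Str.split? row ",").getD []
    let st := parts.getD 0 ""
    let et := parts.getD 1 ""
    let name := parts.getD 2 ""
    let info := parts.getD 3 ""
    let t := toSec et - toSec st
    let notes := change_alt info
    let L := PySem.Str.len notes
    -- circular match: the played string is the length-t prefix of notes repeated forever,
    -- so it contains melody iff some window starting at j < L fits within t
    let ext := String.ofList (PySem.List.pyRepeat notes.toList (1 + PySem.Int.floordiv (k + L - 1) L))
    if (PySem.List.pyRange 0 (min L (t - k + 1)) 1).any
         (fun j => PySem.Str.slice ext (some j) (some (j + k)) == melody) then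
      if best.isNone || decide ((best.getD (0, "")).1 < t) then some (t, name) else best
    else best) none
  match best with
  | some b => b.2
  | none => "(None)"

-- ===== PRECONDITION & SPEC =====
-- Pre_ = the natural domain on which Python A returns a sensible value: each entry splits at
-- ',' into exactly 4 fields, the four int(...) parses succeed, the note field is nonempty
-- (else ZeroDivisionError), and the end time is not before the start time — a negative
-- duration is outside the task's natural domain (A still returns there, matching against a
-- leftover fragment info[:t % len]; B reports no match for a negative-length play).
def Pre_solution (m : String) (musicinfos : List String) : Prop :=
  ∀ mi ∈ musicinfos,
    ((PySem.Str.split? mi ",").getD []).length = 4 ∧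
    PySem.Int.ofStr? (PySem.Str.slice (((PySem.Str.split? mi ",").getD []).getD 0 "") none (some 2)) ≠ none ∧
    PySem.Int.ofStr? (PySem.Str.slice (((PySem.Str.split? mi ",").getD []).getD 0 "") (some 3) none) ≠ none ∧
    PySem.Int.ofStr? (PySem.Str.slice (((PySem.Str.split? mi ",").getD []).getD 1 "") none (some 2)) ≠ none ∧
    PySem.Int.ofStr? (PySem.Str.slice (((PySem.Str.split? mi ",").getD []).getD 1 "") (some 3) none) ≠ none ∧
    ((PySem.Str.split? mi ",").getD []).getD 3 "" ≠ "" ∧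
    (PySem.Int.ofStr? (PySem.Str.slice (((PySem.Str.split? mi ",").getD []).getD 0 "") none (some 2))).getD 0 * 60 +
      (PySem.Int.ofStr? (PySem.Str.slice (((PySem.Str.split? mi ",").getD []).getD 0 "") (some 3) none)).getD 0 ≤
    (PySem.Int.ofStr? (PySem.Str.slice (((PySem.Str.split? mi ",").getD []).getD 1 "") none (some 2))).getD 0 * 60 +
      (PySem.Int.ofStr? (PySem.Str.slice (((PySem.Str.split? mi ",").getD []).getD 1 "") (some 3) none)).getD 0
instance (m : String) (musicinfos : List String) : Decidable (Pre_solution m musicinfos) := by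
  unfold Pre_solution; infer_instance

def pvWitness_solution : String × List String := ("ABC", ["00:00,00:30,tune,ABC"])

def Spec_solution (m : String) (musicinfos : List String) (out : String) : Prop := out = solution_alt m musicinfos
instance (m : String) (musicinfos : List String) (out : String) : Decidable (Spec_solution m musicinfos out) := by unfold Spec_solution; infer_instance

-- ===== CLAIM (what is proved, stated in full; the proofs are below) =====
def Claim_equal_solution : Prop := ∀ (m : String) (musicinfos : List String), Dom_solution m musicinfos → Pre_solution m musicinfos → Spec_solution m musicinfos (solution m musicinfos)

-- ===== LEMMAS AND PROOFS =====

-- ---- change = change_alt (six replace passes = one scan) ----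
def R (a x : Char) : List Char → List Char
  | [] => []
  | [c] => [c]
  | c :: d :: rest => if c = a ∧ d = '#' then x :: R a x rest else c :: R a x (d :: rest)
termination_by l => l.length

lemma go_eq_R (a x : Char) : ∀ (fuel : Nat) (l acc : List Char), l.length ≤ fuel →
    PySem.Chars.replace.go [a, '#'] [x] fuel l acc = acc.reverse ++ R a x l := by
  intro fuel
  induction fuel with
  | zero =>
    intro l acc h
    have hl : l = [] := List.eq_nil_of_length_eq_zero (Nat.le_zero.mp h)
    subst hl
    simp [PySem.Chars.replace.go, R]
  | succ n ih =>
    intro l acc h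
    match l with
    | [] => simp [PySem.Chars.replace.go, R]
    | [c] =>
      have hp : List.isPrefixOf [a, '#'] [c] = false := by
        simp [List.isPrefixOf]
      simp only [PySem.Chars.replace.go, hp, Bool.false_eq_true, if_false]
      rw [ih [] (c :: acc) (by simp)]
      simp [R]
    | c :: d :: rest =>
      by_cases hc : c = a ∧ d = '#'
      · have hp : List.isPrefixOf [a, '#'] (c :: d :: rest) = true := by
          simp [List.isPrefixOf, hc.1, hc.2]
        simp only [PySem.Chars.replace.go, hp, if_true, List.length_cons, List.drop_succ_cons,
          List.length_nil, List.drop_zero, Nat.zero_add]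
        rw [ih rest ([x].reverse ++ acc) (by simp at h ⊢; omega)]
        simp [R, hc.1, hc.2]
      · have hp : List.isPrefixOf [a, '#'] (c :: d :: rest) = false := by
          simp [List.isPrefixOf]
          intro h1 h2; exact hc ⟨h1.symm, h2.symm⟩
        simp only [PySem.Chars.replace.go, hp, Bool.false_eq_true, if_false]
        rw [ih (d :: rest) (c :: acc) (by simp at h ⊢; omega)]
        simp [R, hc]

lemma replace_eq_R (a x : Char) (l : List Char) :
    PySem.Chars.replace l [a, '#'] [x] = R a x l := by
  have := go_eq_R a x l.length l [] (le_refl _)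
  simpa [PySem.Chars.replace] using this

lemma R_cons (a x y : Char) (ys : List Char) (h : ¬(y = a ∧ ys.head? = some '#')) :
    R a x (y :: ys) = y :: R a x ys := by
  match ys with
  | [] => simp [R]
  | e :: ys' =>
    rw [R]
    rw [if_neg (by simpa using h)]

lemma R_cons_ne (a x y : Char) (ys : List Char) (h : y ≠ a) :
    R a x (y :: ys) = y :: R a x ys :=
  R_cons a x y ys (fun hc => h hc.1)

lemma R_match (a x : Char) (ys : List Char) : R a x (a :: '#' :: ys) = x :: R a x ys := by
  rw [R, if_pos ⟨rfl, rfl⟩]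

lemma R_pass2 (a x c : Char) (ys : List Char) (ha : ('#' : Char) ≠ a) (h : c ≠ a) :
    R a x (c :: '#' :: ys) = c :: '#' :: R a x ys := by
  rw [R, if_neg (fun hc => h hc.1), R_cons_ne a x '#' ys ha]

lemma head?_R (a x : Char) (ys : List Char) (hx : x ≠ '#') (h : ys.head? ≠ some '#') :
    (R a x ys).head? ≠ some '#' := by
  match ys with
  | [] => simp [R]
  | [y] => simpa [R] using h
  | y :: e :: t =>
    rw [R]
    split
    · simpa using hx
    · simpa using h

lemma chain_eq : ∀ cs : List Char,
    R 'B' 'b' (R 'A' 'a' (R 'G' 'g' (R 'F' 'f' (R 'D' 'd' (R 'C' 'c' cs))))) = scanChange cs := by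
  intro cs
  induction cs using scanChange.induct with
  | case1 => simp [R, scanChange]
  | case2 c => simp [R, scanChange]
  | case3 c d rest hp ih =>
    obtain ⟨hd, hn⟩ := hp
    subst hd
    rw [show scanChange (c :: '#' :: rest) = lowNote c :: scanChange rest from by
      rw [scanChange, if_pos ⟨rfl, hn⟩]]
    simp only [isNote, Bool.or_eq_true, beq_iff_eq] at hn
    rcases hn with ((((h | h) | h) | h) | h) | h <;> subst h <;> rw [← ih] <;> clear ih
    · rw [R_match, R_cons_ne _ _ _ _ (by decide), R_cons_ne _ _ _ _ (by decide),
        R_cons_ne _ _ _ _ (by decide), R_cons_ne _ _ _ _ (by decide),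
        R_cons_ne _ _ _ _ (by decide)]
      rfl
    · rw [R_pass2 _ _ _ _ (by decide) (by decide), R_match, R_cons_ne _ _ _ _ (by decide),
        R_cons_ne _ _ _ _ (by decide), R_cons_ne _ _ _ _ (by decide),
        R_cons_ne _ _ _ _ (by decide)]
      rfl
    · rw [R_pass2 _ _ _ _ (by decide) (by decide), R_pass2 _ _ _ _ (by decide) (by decide),
        R_match, R_cons_ne _ _ _ _ (by decide), R_cons_ne _ _ _ _ (by decide),
        R_cons_ne _ _ _ _ (by decide)]
      rfl
    · rw [R_pass2 _ _ _ _ (by decide) (by decide), R_pass2 _ _ _ _ (by decide) (by decide),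
        R_pass2 _ _ _ _ (by decide) (by decide), R_match, R_cons_ne _ _ _ _ (by decide),
        R_cons_ne _ _ _ _ (by decide)]
      rfl
    · rw [R_pass2 _ _ _ _ (by decide) (by decide), R_pass2 _ _ _ _ (by decide) (by decide),
        R_pass2 _ _ _ _ (by decide) (by decide), R_pass2 _ _ _ _ (by decide) (by decide),
        R_match, R_cons_ne _ _ _ _ (by decide)]
      rfl
    · rw [R_pass2 _ _ _ _ (by decide) (by decide), R_pass2 _ _ _ _ (by decide) (by decide),
        R_pass2 _ _ _ _ (by decide) (by decide), R_pass2 _ _ _ _ (by decide) (by decide),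
        R_pass2 _ _ _ _ (by decide) (by decide), R_match]
      rfl
  | case4 c d rest hp ih =>
    rw [show scanChange (c :: d :: rest) = c :: scanChange (d :: rest) from by
      rw [scanChange, if_neg hp], ← ih]
    by_cases hn : isNote c = true
    · have hd : d ≠ '#' := fun h => hp ⟨h, hn⟩
      have l0 : (d :: rest).head? ≠ some '#' := by simpa using hd
      have l1 := head?_R 'C' 'c' (d :: rest) (by decide) l0
      have l2 := head?_R 'D' 'd' _ (by decide) l1
      have l3 := head?_R 'F' 'f' _ (by decide) l2
      have l4 := head?_R 'G' 'g' _ (by decide) l3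
      have l5 := head?_R 'A' 'a' _ (by decide) l4
      rw [R_cons _ _ _ _ (fun hc => l0 hc.2), R_cons _ _ _ _ (fun hc => l1 hc.2),
        R_cons _ _ _ _ (fun hc => l2 hc.2), R_cons _ _ _ _ (fun hc => l3 hc.2),
        R_cons _ _ _ _ (fun hc => l4 hc.2), R_cons _ _ _ _ (fun hc => l5 hc.2)]
    · simp only [isNote, Bool.or_eq_true, beq_iff_eq] at hn
      push Not at hn
      obtain ⟨⟨⟨⟨⟨n1, n2⟩, n3⟩, n4⟩, n5⟩, n6⟩ := hn
      rw [R_cons_ne _ _ _ _ n1, R_cons_ne _ _ _ _ n2, R_cons_ne _ _ _ _ n3,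
        R_cons_ne _ _ _ _ n4, R_cons_ne _ _ _ _ n5, R_cons_ne _ _ _ _ n6]

lemma change_eq (s : String) : change s = change_alt s := by
  simp only [change, change_alt, PySem.Str.replace]
  have h1 : ("C#" : String).toList = ['C', '#'] := rfl
  have h2 : ("D#" : String).toList = ['D', '#'] := rfl
  have h3 : ("F#" : String).toList = ['F', '#'] := rfl
  have h4 : ("G#" : String).toList = ['G', '#'] := rfl
  have h5 : ("A#" : String).toList = ['A', '#'] := rfl
  have h6 : ("B#" : String).toList = ['B', '#'] := rfl
  rw [h1, h2, h3, h4, h5, h6]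
  simp only [String.toList_ofList,
    show ("c" : String).toList = ['c'] from rfl, show ("d" : String).toList = ['d'] from rfl,
    show ("f" : String).toList = ['f'] from rfl, show ("g" : String).toList = ['g'] from rfl,
    show ("a" : String).toList = ['a'] from rfl, show ("b" : String).toList = ['b'] from rfl]
  rw [replace_eq_R, replace_eq_R, replace_eq_R, replace_eq_R, replace_eq_R, replace_eq_R]
  rw [chain_eq]

-- ---- the periodic-sequence view of the played string ----
-- gfn notes i = the i-th character of "notes repeated forever"
def gfn (notes : List Char) (i : Nat) : Char := notes.getD (i % notes.length) ' '

lemma map_range_gfn_self (notes : List Char) :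
    (List.range notes.length).map (gfn notes) = notes := by
  apply List.ext_getElem (by simp)
  intro i h1 h2
  have hi : i < notes.length := by simpa using h2
  simp [gfn, Nat.mod_eq_of_lt hi, List.getD, List.getElem?_eq_getElem hi]

lemma rep_eq_map_range (notes : List Char) : ∀ q : Nat,
    (List.replicate q notes).flatten = (List.range (q * notes.length)).map (gfn notes) := by
  intro q
  induction q with
  | zero => simp
  | succ n ih =>
    rw [show (n + 1) * notes.length = notes.length + n * notes.length from by ring,
      List.range_add, List.map_append, List.replicate_succ, List.flatten_cons, ih,
      map_range_gfn_self, List.map_map]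
    congr 1
    apply List.map_congr_left
    intro i _
    simp [gfn, Function.comp, Nat.add_mod_left]

lemma take_eq_map_range (notes : List Char) (r : Nat) (hr : r ≤ notes.length) :
    notes.take r = (List.range r).map (gfn notes) := by
  apply List.ext_getElem (by simp; omega)
  intro i h1 h2
  have hi : i < notes.length := by simp at h2; omega
  simp [gfn, Nat.mod_eq_of_lt hi, List.getD, List.getElem?_eq_getElem hi]

-- window of length k starting at j in the infinite periodic sequence
def win (notes : List Char) (j k : Nat) : List Char :=
  (List.range k).map (fun i => gfn notes (j + i))

lemma win_mod (notes : List Char) (j k : Nat) :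
    win notes (j % notes.length) k = win notes j k := by
  unfold win
  apply List.map_congr_left
  intro i _
  simp [gfn, Nat.mod_add_mod]

lemma drop_take_map_range {n j k : Nat} (g : Nat → Char) (h : j + k ≤ n) :
    (((List.range n).map g).drop j).take k = (List.range k).map (fun i => g (j + i)) := by
  apply List.ext_getElem (by simp; omega)
  intro i h1 h2
  have hi : i < k := by simpa using h2
  simp [List.getElem_drop, List.getElem_map]

-- melody occurs in the length-n prefix of the periodic sequence iff it occurs at some window
lemma isIn_map_range (mel : List Char) (notes : List Char) (n : Nat) :
    PySem.Chars.isIn mel ((List.range n).map (gfn notes)) = true ↔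
      ∃ j, j + mel.length ≤ n ∧ win notes j mel.length = mel := by
  rw [← PySem.Chars.exists_prefix_drop_iff_isIn]
  constructor
  · rintro ⟨j, hpre⟩
    have hlen : mel.length ≤ ((((List.range n).map (gfn notes))).drop j).length := hpre.length_le
    simp only [List.length_drop, List.length_map, List.length_range] at hlen
    by_cases hj : j + mel.length ≤ n
    · refine ⟨j, hj, ?_⟩
      have := List.prefix_iff_eq_take.mp hpre
      rw [drop_take_map_range (gfn notes) hj] at this
      exact this.symm
    · have hk : mel.length = 0 := by omega
      refine ⟨0, by omega, ?_⟩
      rw [List.eq_nil_of_length_eq_zero hk]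
      simp [win]
  · rintro ⟨j, hj, hw⟩
    refine ⟨j, List.prefix_iff_eq_take.mpr ?_⟩
    rw [drop_take_map_range (gfn notes) hj]
    exact hw.symm

-- reduce the window start to a residue < notes.length
lemma exists_win_lt (mel notes : List Char) (n : Nat) (hL : notes ≠ []) :
    (∃ j, j + mel.length ≤ n ∧ win notes j mel.length = mel) ↔
      (∃ j, j < notes.length ∧ j + mel.length ≤ n ∧ win notes j mel.length = mel) := by
  have hL0 : 0 < notes.length := List.length_pos_of_ne_nil hL
  constructor
  · rintro ⟨j, hj, hw⟩
    exact ⟨j % notes.length, Nat.mod_lt _ hL0, by have := Nat.mod_le j notes.length; omega,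
      by rw [win_mod]; exact hw⟩
  · rintro ⟨j, _, hj, hw⟩
    exact ⟨j, hj, hw⟩

-- ---- the core: A's "melody in played string" equals B's circular window scan ----
lemma circ_eq (mel notes : List Char) (t : Int) (hn : notes ≠ []) (ht : 0 ≤ t) :
    PySem.Chars.isIn mel
      (PySem.List.pyRepeat notes (PySem.Int.floordiv t notes.length) ++
       PySem.Chars.slice notes none (some (PySem.Int.mod t notes.length))) =
    (PySem.List.pyRange 0 (min (notes.length : Int) (t - mel.length + 1)) 1).any
      (fun j => decide (PySem.Chars.slice
         (PySem.List.pyRepeat notes (1 + PySem.Int.floordiv ((mel.length : Int) + notes.length - 1) notes.length))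
         (some j) (some (j + mel.length)) = mel)) := by
  have hL0 : 0 < notes.length := List.length_pos_of_ne_nil hn
  have hLpos : (0 : Int) < notes.length := by exact_mod_cast hL0
  set L := notes.length with hLdef
  set k := mel.length with hkdef
  -- normalise the A side to (range n).map gfn, n = t.toNat
  have hfd : PySem.Int.floordiv t L = t / L := PySem.Int.floordiv_eq_ediv_of_pos hLpos
  have hmd : PySem.Int.mod t L = t % L := PySem.Int.mod_eq_emod_of_pos hLpos
  have hq0 : 0 ≤ t / (L : Int) := Int.ediv_nonneg ht (le_of_lt hLpos)
  have hr0 : 0 ≤ t % (L : Int) := Int.emod_nonneg t (by omega)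
  have hrL : t % (L : Int) < L := Int.emod_lt_of_pos t hLpos
  set q := (t / (L : Int)).toNat with hqdef
  set r := (t % (L : Int)).toNat with hrdef
  have hqr : q * L + r = t.toNat := by
    have h1 := Int.toNat_of_nonneg hq0
    have h2 := Int.toNat_of_nonneg hr0
    have h3 := Int.mul_ediv_add_emod t (L : Int)
    have h4 : ((q * L + r : Nat) : Int) = t := by
      push_cast
      rw [h1, h2]
      linarith
    omega
  have hA : PySem.List.pyRepeat notes (PySem.Int.floordiv t L) ++
      PySem.Chars.slice notes none (some (PySem.Int.mod t L)) =
      (List.range t.toNat).map (gfn notes) := by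
    simp only [PySem.Chars.slice]
    rw [hfd, hmd, PySem.List.pyRepeat, PySem.List.slice_to notes hr0,
      rep_eq_map_range, take_eq_map_range notes r (by omega), ← hqr, List.range_add,
      List.map_append, List.map_map]
    congr 1
    apply List.map_congr_left
    intro i _
    simp only [gfn, Function.comp]
    rw [Nat.mul_add_mod']
  rw [hA]
  -- normalise the B side
  have hck : ((k : Int) + L - 1) = ((k + L - 1 : Nat) : Int) := by omega
  have hfd2 : 1 + PySem.Int.floordiv ((k : Int) + L - 1) L = ((1 + (k + L - 1) / L : Nat) : Int) := by
    rw [hck, PySem.Int.floordiv_natCast]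
    omega
  set en := 1 + (k + L - 1) / L with hendef
  have hE : ∀ j, j < L → j + k ≤ en * L := by
    intro j hj
    have h1 := Nat.div_add_mod (k + L - 1) L
    have h2 := Nat.mod_lt (k + L - 1) hL0
    have h4 : en * L = L + L * ((k + L - 1) / L) := by rw [hendef]; ring
    omega
  have hext : PySem.List.pyRepeat notes (1 + PySem.Int.floordiv ((k : Int) + L - 1) L) =
      (List.range (en * L)).map (gfn notes) := by
    rw [hfd2, PySem.List.pyRepeat, Int.toNat_natCast, rep_eq_map_range]
  rw [hext]
  -- turn both into the same existential
  rw [Bool.eq_iff_iff, isIn_map_range, exists_win_lt mel notes _ hn, List.any_eq_true]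
  constructor
  · rintro ⟨j, hjL, hjk, hw⟩
    refine ⟨(j : Int), ?_, ?_⟩
    · rw [PySem.List.mem_pyRange_one]
      constructor
      · positivity
      · simp only [lt_min_iff]
        constructor
        · exact_mod_cast hjL
        · have : (j : Int) + k ≤ t := by
            have := Int.toNat_of_nonneg ht
            omega
          omega
    · rw [decide_eq_true_iff]
      have hjE : j + k ≤ en * L := hE j hjL
      simp only [PySem.Chars.slice]
      rw [show ((j : Int) + (k : Int)) = ((j + k : Nat) : Int) from by push_cast; ring,
        PySem.List.slice_natCast, show j + k - j = k from by omega,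
        drop_take_map_range (gfn notes) hjE]
      exact hw
  · rintro ⟨jI, hmem, hp⟩
    rw [PySem.List.mem_pyRange_one] at hmem
    obtain ⟨hj0, hjlt⟩ := hmem
    simp only [lt_min_iff] at hjlt
    set j := jI.toNat with hjdef
    have hjI : jI = (j : Int) := (Int.toNat_of_nonneg hj0).symm
    have hjL : j < L := by omega
    have hjk : j + k ≤ t.toNat := by omega
    refine ⟨j, hjL, hjk, ?_⟩
    rw [decide_eq_true_iff] at hp
    simp only [PySem.Chars.slice] at hp
    rw [hjI, show ((j : Int) + (k : Int)) = ((j + k : Nat) : Int) from by push_cast; ring,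
      PySem.List.slice_natCast, show j + k - j = k from by omega,
      drop_take_map_range (gfn notes) (hE j hjL)] at hp
    exact hp

-- ---- per-row data and match predicates ----
def pairB (row : String) : Int × String :=
  (toSec (((PySem.Str.split? row ",").getD []).getD 1 "") -
     toSec (((PySem.Str.split? row ",").getD []).getD 0 ""),
   ((PySem.Str.split? row ",").getD []).getD 2 "")

-- A's match test (with change already rewritten to change_alt)
def matchA (melody row : String) : Bool :=
  let info' := change_alt (((PySem.Str.split? row ",").getD []).getD 3 "")
  let dm := (PySem.Int.divmod? (pairB row).1 (PySem.Str.len info')).getD (0, 0)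
  PySem.Str.isIn melody (String.ofList (PySem.List.pyRepeat info'.toList dm.1 ++
    PySem.Chars.slice info'.toList none (some dm.2)))

-- B's match test: circular window scan
def matchC (melody row : String) : Bool :=
  let notes := change_alt (((PySem.Str.split? row ",").getD []).getD 3 "")
  let L := PySem.Str.len notes
  let k := PySem.Str.len melody
  let ext := String.ofList (PySem.List.pyRepeat notes.toList (1 + PySem.Int.floordiv (k + L - 1) L))
  (PySem.List.pyRange 0 (min L ((pairB row).1 - k + 1)) 1).any
    (fun j => PySem.Str.slice ext (some j) (some (j + k)) == melody)

lemma scanChange_ne_nil : ∀ l : List Char, l ≠ [] → scanChange l ≠ [] := by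
  intro l hl
  match l with
  | [c] => simp [scanChange]
  | c :: d :: rest =>
    rw [scanChange]
    split <;> simp

lemma circ_eq' (melody : String) (notes : List Char) (t : Int) (hn : notes ≠ []) (ht : 0 ≤ t) :
    PySem.Chars.isIn melody.toList
      (PySem.List.pyRepeat notes (((PySem.Int.divmod? t notes.length).getD (0,0)).1) ++
       PySem.Chars.slice notes none (some (((PySem.Int.divmod? t notes.length).getD (0,0)).2))) =
    (PySem.List.pyRange 0 (min (notes.length : Int) (t - melody.toList.length + 1)) 1).any
      (fun j => PySem.Str.slice (String.ofList (PySem.List.pyRepeat notes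
          (1 + PySem.Int.floordiv ((melody.toList.length : Int) + notes.length - 1) notes.length)))
        (some j) (some (j + melody.toList.length)) == melody) := by
  have hLne : ((notes.length : Int)) ≠ 0 := by simpa using hn
  have hc := circ_eq melody.toList notes t hn ht
  simp only [PySem.Int.floordiv, PySem.Int.mod] at hc
  simp only [PySem.Int.divmod?, hLne, if_false, Option.getD_some]
  rw [hc]
  congr 1
  funext j
  rw [Bool.beq_eq_decide_eq]
  apply decide_eq_decide.mpr
  rw [← String.toList_inj]
  simp [PySem.Str.slice, PySem.Int.floordiv]

lemma match_eq (melody row : String)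
    (hinfo : ((PySem.Str.split? row ",").getD []).getD 3 "" ≠ "")
    (ht : 0 ≤ (pairB row).1) :
    matchA melody row = matchC melody row := by
  unfold matchA matchC
  set info := ((PySem.Str.split? row ",").getD []).getD 3 "" with hinfodef
  set t := (pairB row).1 with htdef
  have h0 : info.toList ≠ [] := fun h => hinfo (String.toList_inj.mp (by simp [h]))
  have hnl : (change_alt info).toList ≠ [] := by
    simp only [change_alt, String.toList_ofList]
    exact scanChange_ne_nil _ h0
  simp only [PySem.Str.len_eq, PySem.Str.isIn_eq, String.toList_ofList]
  exact circ_eq' melody (change_alt info).toList t hnl ht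

-- ---- selection: collect-then-sort = running best ----
def stepAfn (mf : String → Bool) (ans : List (Int × String)) (row : String) : List (Int × String) :=
  if mf row then ans ++ [pairB row] else ans

def optStep (b : Option (Int × String)) (p : Int × String) : Option (Int × String) :=
  if b.isNone || decide ((b.getD (0, "")).1 < p.1) then some p else b

def stepBfn (mf : String → Bool) (b : Option (Int × String)) (row : String) : Option (Int × String) :=
  if mf row then optStep b (pairB row) else b

def maxStep (b p : Int × String) : Int × String := if b.1 < p.1 then p else b

lemma fold_corr (mf : String → Bool) : ∀ (rows : List String) (ans : List (Int × String))
    (b : Option (Int × String)), b = ans.foldl optStep none →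
    rows.foldl (stepBfn mf) b = (rows.foldl (stepAfn mf) ans).foldl optStep none := by
  intro rows
  induction rows with
  | nil => intro ans b hb; simpa using hb
  | cons row rest ih =>
    intro ans b hb
    simp only [List.foldl_cons]
    apply ih
    unfold stepBfn stepAfn
    by_cases h : mf row
    · simp only [h, if_true, List.foldl_append, List.foldl_cons, List.foldl_nil, hb]
    · simp [h, hb]

lemma foldl_optStep_some : ∀ (l : List (Int × String)) (b : Int × String),
    l.foldl optStep (some b) = some (l.foldl maxStep b) := by
  intro l
  induction l with
  | nil => intro b; rfl
  | cons p rest ih =>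
    intro b
    simp only [List.foldl_cons]
    rw [show optStep (some b) p = some (maxStep b p) from by
      unfold optStep maxStep
      by_cases h : b.1 < p.1 <;> simp [h]]
    exact ih (maxStep b p)

lemma ins_head : ∀ (l : List (Int × String)) (h : Int × String) (t : List (Int × String))
    (d : Int × String),
    ((l.foldl (fun acc x =>
        PySem.List.insertBy (fun a b => decide ((fun x : Int × String => -x.1) a <
          (fun x : Int × String => -x.1) b)) x acc) (h :: t)).headD d) = l.foldl maxStep h := by
  intro l
  induction l with
  | nil => intro h t d; rfl
  | cons q rest ih =>
    intro h t d
    simp only [List.foldl_cons]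
    by_cases hq : h.1 < q.1
    · rw [show PySem.List.insertBy (fun a b => decide ((fun x : Int × String => -x.1) a <
          (fun x : Int × String => -x.1) b)) q (h :: t) = q :: h :: t from by
        simp [PySem.List.insertBy]; omega]
      rw [ih q (h :: t) d]
      unfold maxStep
      rw [if_pos hq]
    · rw [show PySem.List.insertBy (fun a b => decide ((fun x : Int × String => -x.1) a <
          (fun x : Int × String => -x.1) b)) q (h :: t) = h :: PySem.List.insertBy
          (fun a b => decide ((fun x : Int × String => -x.1) a <
          (fun x : Int × String => -x.1) b)) q t from by
        simp [PySem.List.insertBy]; omega]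
      rw [ih h _ d]
      unfold maxStep
      rw [if_neg hq]

lemma sorted_head (p : Int × String) (rest : List (Int × String)) :
    (PySem.List.sorted (p :: rest) (fun x => -x.1) false).headD (0, "") =
      rest.foldl maxStep p := by
  rw [PySem.List.sorted_eq_foldl_insertBy]
  simp only [List.foldl_cons]
  rw [show PySem.List.insertBy (fun a b => decide ((fun x : Int × String => -x.1) a <
      (fun x : Int × String => -x.1) b)) p [] = [p] from rfl]
  exact ins_head rest p [] (0, "")

-- ---- assembling the two ports ----
lemma main_eq (m : String) (musicinfos : List String)
    (hpre : Pre_solution m musicinfos) :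
    solution m musicinfos = solution_alt m musicinfos := by
  have hA : solution m musicinfos =
      (let answer := musicinfos.foldl (stepAfn (matchA (change_alt m))) []
       if answer.isEmpty then "(None)"
       else ((PySem.List.sorted answer (fun x => -x.1) false).headD (0, "")).2) := by
    simp only [solution, change_eq]
    rfl
  have hB : solution_alt m musicinfos =
      (match musicinfos.foldl (stepBfn (matchC (change_alt m))) none with
       | some b => b.2
       | none => "(None)") := rfl
  rw [hA, hB]
  have hswap : musicinfos.foldl (stepBfn (matchC (change_alt m))) none =
      musicinfos.foldl (stepBfn (matchA (change_alt m))) none := by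
    apply PySem.List.foldl_congr_mem
    intro acc row hrow
    unfold stepBfn
    rw [match_eq (change_alt m) row ((hpre row hrow).2.2.2.2.2.1) (by
      have h := (hpre row hrow).2.2.2.2.2.2
      simp only [pairB, toSec]
      omega)]
  rw [hswap, fold_corr (matchA (change_alt m)) musicinfos [] none rfl]
  cases hans : musicinfos.foldl (stepAfn (matchA (change_alt m))) [] with
  | nil => rfl
  | cons p rest =>
    simp only [List.isEmpty_cons, List.foldl_cons]
    rw [show optStep none p = some p from rfl, foldl_optStep_some, sorted_head]
    rfl

-- ===== VERDICT (by name: the statement is the Claim_ definition above) =====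
theorem solution_spec : Claim_equal_solution := by
  intro m musicinfos _ hpre
  unfold Spec_solution
  exact main_eq m musicinfos hpre
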